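-- pv_equiv track=rewrite | github.com/vtheno/lightWeb | test/test.py | my_lex
-- ===== SOURCE A (Python) =====
-- def ll(inp):
--     temp = ''
--     count = 2
--     while inp and inp[0] == '{' and count > 0:
--         temp += inp[0]
--         inp = inp[1:]
--         count -= 1
--     if temp:
--         return temp,inp
--
-- def rr(inp):
--     temp = ''
--     count = 2
--     while inp and inp[0] == '}' and count > 0:
--         temp += inp[0]
--         inp = inp[1:]
--         count -= 1
--     if temp:
--         return temp,inp
--
-- def my_lex(inp: str) -> str:
--     while inp:
--         if inp[0] == "{":
--             value = ll(inp)
--             if value: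
--                 out,inp = value
--                 yield out
--         elif inp[0] == "}":
--             value = rr(inp)
--             if value:
--                 out,inp = value
--                 yield out
--         else:
--             out,inp = inp[0],inp[1:]
--             yield out
-- ===== SOURCE B (Python) =====
-- def my_lex(inp: str):
--     # single O(n) index scan with one-char lookahead; no slicing, no helpers
--     i = 0
--     n = len(inp)
--     while i < n:
--         c = inp[i]
--         if (c == '{' or c == '}') and i + 1 < n and inp[i + 1] == c:
--             yield c + c
--             i += 2
--         else:
--             yield c
--             i += 1
-- ===== Notes on version B (the rewrite author's own statement) =====
-- stated objective: faster
-- what changed: Replaced the helper-based loop that repeatedly slices the string (inp = inp[1:]) with a single index-based scan using one-character lookahead that groups doubled braces directly.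
import Mathlib
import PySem

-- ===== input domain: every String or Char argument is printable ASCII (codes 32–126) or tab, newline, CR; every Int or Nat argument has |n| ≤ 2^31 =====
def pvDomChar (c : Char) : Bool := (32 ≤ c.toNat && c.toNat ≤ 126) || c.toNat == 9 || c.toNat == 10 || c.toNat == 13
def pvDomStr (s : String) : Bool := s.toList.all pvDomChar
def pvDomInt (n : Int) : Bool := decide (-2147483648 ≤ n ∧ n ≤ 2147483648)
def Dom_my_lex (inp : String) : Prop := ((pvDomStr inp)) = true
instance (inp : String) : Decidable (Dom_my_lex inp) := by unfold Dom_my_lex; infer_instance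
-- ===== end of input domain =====

-- B replaces A's slicing helpers with one index-based linear scan using lookahead (faster, O(n) vs O(n^2)).

-- ===== PORT A =====
-- ll's while loop: temp accumulator, fuel = count (starts at 2)
def llLoopA (temp : List Char) (inp : List Char) (count : Nat) : List Char × List Char :=
  match count, inp with
  | Nat.succ k, c :: rest => if c = '{' then llLoopA (temp ++ [c]) rest k else (temp, c :: rest)
  | _, _ => (temp, inp)

def llA (inp : List Char) : Option (List Char × List Char) :=
  match llLoopA [] inp 2 with
  | (temp, rest) => if temp.isEmpty then none else some (temp, rest)

def rrLoopA (temp : List Char) (inp : List Char) (count : Nat) : List Char × List Char :=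
  match count, inp with
  | Nat.succ k, c :: rest => if c = '}' then rrLoopA (temp ++ [c]) rest k else (temp, c :: rest)
  | _, _ => (temp, inp)

def rrA (inp : List Char) : Option (List Char × List Char) :=
  match rrLoopA [] inp 2 with
  | (temp, rest) => if temp.isEmpty then none else some (temp, rest)

-- lemmas the port needs for termination
theorem llLoopA_len : ∀ (count : Nat) (temp inp : List Char), (llLoopA temp inp count).2.length ≤ inp.length := by
  intro count
  induction count with
  | zero => intro temp inp; cases inp <;> simp [llLoopA]
  | succ k ih =>
    intro temp inp
    cases inp with
    | nil => simp [llLoopA]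
    | cons c rest =>
      by_cases h : c = '{'
      · simpa [llLoopA, h] using Nat.le_succ_of_le (ih (temp ++ [c]) rest)
      · simp [llLoopA, h]

theorem rrLoopA_len : ∀ (count : Nat) (temp inp : List Char), (rrLoopA temp inp count).2.length ≤ inp.length := by
  intro count
  induction count with
  | zero => intro temp inp; cases inp <;> simp [rrLoopA]
  | succ k ih =>
    intro temp inp
    cases inp with
    | nil => simp [rrLoopA]
    | cons c rest =>
      by_cases h : c = '}'
      · simpa [rrLoopA, h] using Nat.le_succ_of_le (ih (temp ++ [c]) rest)
      · simp [rrLoopA, h]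

theorem llA_some_len {c : Char} {rest out inp' : List Char} (hc : c = '{')
    (h : llA (c :: rest) = some (out, inp')) : inp'.length < (c :: rest).length := by
  have h1 : llLoopA [] (c :: rest) 2 = llLoopA [c] rest 1 := by simp [llLoopA, hc]
  have h2 : inp' = (llLoopA [] (c :: rest) 2).2 := by
    unfold llA at h
    rcases hm : llLoopA [] (c :: rest) 2 with ⟨t, r⟩
    rw [hm] at h
    by_cases ht : t.isEmpty <;> simp [ht] at h
    simp [h.2]
  rw [h2, h1]
  exact Nat.lt_succ_of_le (llLoopA_len 1 [c] rest)

theorem rrA_some_len {c : Char} {rest out inp' : List Char} (hc : c = '}')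
    (h : rrA (c :: rest) = some (out, inp')) : inp'.length < (c :: rest).length := by
  have h1 : rrLoopA [] (c :: rest) 2 = rrLoopA [c] rest 1 := by simp [rrLoopA, hc]
  have h2 : inp' = (rrLoopA [] (c :: rest) 2).2 := by
    unfold rrA at h
    rcases hm : rrLoopA [] (c :: rest) 2 with ⟨t, r⟩
    rw [hm] at h
    by_cases ht : t.isEmpty <;> simp [ht] at h
    simp [h.2]
  rw [h2, h1]
  exact Nat.lt_succ_of_le (rrLoopA_len 1 [c] rest)

-- the main while loop of my_lex (the 'none' branches are unreachable: with a brace head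
-- the helper always returns a pair; in Python they would loop forever without yielding)
def lexA : List Char → List (List Char)
  | [] => []
  | c :: rest =>
    if hc : c = '{' then
      match h : llA (c :: rest) with
      | some (out, inp') => out :: lexA inp'
      | none => []
    else if hc2 : c = '}' then
      match h : rrA (c :: rest) with
      | some (out, inp') => out :: lexA inp'
      | none => []
    else [c] :: lexA rest
termination_by l => l.length
decreasing_by
  · exact llA_some_len hc h
  · exact rrA_some_len hc2 h
  · simp

def my_lex (inp : String) : List String :=
  (lexA inp.toList).map (fun t => String.mk t)

-- ===== PORT B =====
-- Source B's index scan over inp with one-char lookahead, rendered as consuming the char list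
def lexB : List Char → List (List Char)
  | [] => []
  | [c] => [[c]]
  | c :: d :: rest =>
    if (c = '{' ∨ c = '}') ∧ d = c then [c, d] :: lexB rest
    else [c] :: lexB (d :: rest)
termination_by l => l.length

def my_lex_alt (inp : String) : List String :=
  (lexB inp.toList).map (fun t => String.mk t)

-- ===== PRECONDITION & SPEC =====
def Spec_my_lex (inp : String) (out : List String) : Prop := out = my_lex_alt inp
instance (inp : String) (out : List String) : Decidable (Spec_my_lex inp out) := by unfold Spec_my_lex; infer_instance

-- ===== CLAIM (what is proved, stated in full; the proofs are below) =====
def Claim_equal_my_lex : Prop := ∀ (inp : String), Dom_my_lex inp → Spec_my_lex inp (my_lex inp)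

-- ===== LEMMAS AND PROOFS =====
theorem llA_two (r : List Char) : llA ('{' :: '{' :: r) = some (['{', '{'], r) := by
  simp [llA, llLoopA]

theorem llA_one {c : Char} (r : List Char) (h : ¬ c = '{') :
    llA ('{' :: c :: r) = some (['{'], c :: r) := by
  simp [llA, llLoopA, h]

theorem llA_single : llA ['{'] = some (['{'], []) := by
  simp [llA, llLoopA]

theorem rrA_two (r : List Char) : rrA ('}' :: '}' :: r) = some (['}', '}'], r) := by
  simp [rrA, rrLoopA]

theorem rrA_one {c : Char} (r : List Char) (h : ¬ c = '}') :
    rrA ('}' :: c :: r) = some (['}'], c :: r) := by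
  simp [rrA, rrLoopA, h]

theorem rrA_single : rrA ['}'] = some (['}'], []) := by
  simp [rrA, rrLoopA]

theorem lexA_eq_lexB : ∀ (l : List Char), lexA l = lexB l
  | [] => by simp [lexA, lexB]
  | [c] => by
    by_cases h1 : c = '{'
    · subst h1
      simp only [lexA, lexB]
      rw [llA_single]
      simp [lexA]
    · by_cases h2 : c = '}'
      · subst h2
        simp only [lexA, lexB]
        rw [rrA_single]
        simp [lexA]
      · simp [lexA, lexB, h1, h2]
  | c :: d :: rest => by
    by_cases h1 : c = '{'
    · subst h1
      by_cases h2 : d = '{'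
      · subst h2
        simp only [lexA, lexB]
        rw [llA_two]
        simp [lexA_eq_lexB rest]
      · simp only [lexA, lexB]
        rw [llA_one _ h2]
        simp [h2, lexA_eq_lexB (d :: rest)]
    · by_cases h2 : c = '}'
      · subst h2
        by_cases h3 : d = '}'
        · subst h3
          simp only [lexA, lexB, h1, dite_false]
          rw [rrA_two]
          simp [lexA_eq_lexB rest]
        · simp only [lexA, lexB, h1, dite_false]
          rw [rrA_one _ h3]
          simp [h1, h3, lexA_eq_lexB (d :: rest)]
      · simp [lexA, lexB, h1, h2, lexA_eq_lexB (d :: rest)]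
termination_by l => l.length

-- ===== VERDICT (by name: the statement is the Claim_ definition above) =====
theorem my_lex_spec : Claim_equal_my_lex := by
  intro inp _
  unfold Spec_my_lex my_lex my_lex_alt
  rw [lexA_eq_lexB]
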